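-- pv_equiv track=rewrite | github.com/Westfall-Softwares/WestfallPersonalAssistant | backend/screen_capture.py | _assess_error_severity
-- ===== SOURCE A (Python) =====
-- from typing import Optional, Dict, Any, List, Tuple
--
-- def _assess_error_severity(errors: List[Dict]) -> str:
--     """Assess the severity of detected errors"""
--     if not errors:
--         return "none"
--
--     critical_patterns = ["crash", "abort", "segmentation fault", "access violation"]
--     high_patterns = ["exception", "error", "failed"]
--
--     for error in errors:
--         if any(pattern in error["pattern"] for pattern in critical_patterns):
--             return "critical"
--
--     for error in errors:
--         if any(pattern in error["pattern"] for pattern in high_patterns):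
--             return "high"
--
--     return "medium"
-- ===== SOURCE B (Python) =====
-- from typing import Optional, Dict, Any, List, Tuple
--
-- def _assess_error_severity(errors: List[Dict]) -> str:
--     """Assess the severity of detected errors"""
--     if not errors:
--         return "none"
--
--     critical_patterns = ["crash", "abort", "segmentation fault", "access violation"]
--     high_patterns = ["exception", "error", "failed"]
--
--     high_found = False
--     for error in errors:
--         text = error["pattern"]
--         if any(p in text for p in critical_patterns):
--             return "critical"
--         if not high_found and any(p in text for p in high_patterns):
--             high_found = True
--
--     return "high" if high_found else "medium"
-- ===== Notes on version B (the rewrite author's own statement) =====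
-- stated objective: simpler
-- what changed: Replaces A's two sequential full scans (critical pass, then high pass) with a single pass carrying a high_found flag; critical still wins globally because any critical hit returns immediately before the flag is consulted.
import Mathlib
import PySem

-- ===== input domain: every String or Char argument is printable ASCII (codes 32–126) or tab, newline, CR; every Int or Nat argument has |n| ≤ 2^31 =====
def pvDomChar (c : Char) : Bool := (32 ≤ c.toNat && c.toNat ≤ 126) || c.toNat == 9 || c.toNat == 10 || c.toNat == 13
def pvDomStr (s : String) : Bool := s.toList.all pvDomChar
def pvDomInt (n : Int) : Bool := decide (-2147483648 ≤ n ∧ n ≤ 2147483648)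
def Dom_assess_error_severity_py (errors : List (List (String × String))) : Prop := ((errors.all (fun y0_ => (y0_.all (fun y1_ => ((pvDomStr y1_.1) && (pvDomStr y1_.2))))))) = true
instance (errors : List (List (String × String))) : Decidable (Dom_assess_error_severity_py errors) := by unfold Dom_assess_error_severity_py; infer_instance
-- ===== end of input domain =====

-- B: one pass with a high_found flag instead of A's two sequential scans (same result; return value only).
-- ===== PORT A =====
def pvCrit : List String := ["crash", "abort", "segmentation fault", "access violation"]
def pvHigh : List String := ["exception", "error", "failed"]
-- error["pattern"]: first-match assoc lookup; KeyError (none) excluded by Pre_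
def pvPat (e : List (String × String)) : String := (e.lookup "pattern").getD ""

def assess_error_severity_py (errors : List (List (String × String))) : String :=
  if errors = [] then "none"
  else if errors.any (fun e => pvCrit.any (fun p => PySem.Str.isIn p (pvPat e))) then "critical"
  else if errors.any (fun e => pvHigh.any (fun p => PySem.Str.isIn p (pvPat e))) then "high"
  else "medium"

-- ===== PORT B =====
def pvGo : List (List (String × String)) → Bool → String
  | [], high_found => if high_found then "high" else "medium"
  | e :: rest, high_found =>
    let text := pvPat e
    if pvCrit.any (fun p => PySem.Str.isIn p text) then "critical"
    else pvGo rest (high_found || pvHigh.any (fun p => PySem.Str.isIn p text))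

def assess_error_severity_py_alt (errors : List (List (String × String))) : String :=
  if errors = [] then "none" else pvGo errors false

-- ===== PRECONDITION & SPEC =====
-- Pre_ excludes exactly the inputs on which A raises KeyError: some error dict lacking the
-- "pattern" key is reached before any critical match (A returns early on a critical match).
def Pre_assess_error_severity_py (errors : List (List (String × String))) : Prop :=
  (errors.all (fun e => (e.lookup "pattern").isSome)) = true ∨
  ∃ i : Fin errors.length,
    ((errors.take (i.val + 1)).all (fun e => (e.lookup "pattern").isSome)) = true ∧
    (pvCrit.any (fun p => PySem.Str.isIn p (pvPat errors[i]))) = true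
instance (errors : List (List (String × String))) : Decidable (Pre_assess_error_severity_py errors) := by
  unfold Pre_assess_error_severity_py; infer_instance
def pvWitness_assess_error_severity_py : (List (List (String × String))) := [[("pattern", "crash")]]
def Spec_assess_error_severity_py (errors : List (List (String × String))) (out : String) : Prop := out = assess_error_severity_py_alt errors
instance (errors : List (List (String × String))) (out : String) : Decidable (Spec_assess_error_severity_py errors out) := by unfold Spec_assess_error_severity_py; infer_instance

-- ===== CLAIM (what is proved, stated in full; the proofs are below) =====
def Claim_equal_assess_error_severity_py : Prop := ∀ (errors : List (List (String × String))), Dom_assess_error_severity_py errors → Pre_assess_error_severity_py errors → Spec_assess_error_severity_py errors (assess_error_severity_py errors)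

-- ===== LEMMAS AND PROOFS =====
theorem pvGo_eq (l : List (List (String × String))) (hf : Bool) :
    pvGo l hf =
      if l.any (fun e => pvCrit.any (fun p => PySem.Str.isIn p (pvPat e))) then "critical"
      else if (hf || l.any (fun e => pvHigh.any (fun p => PySem.Str.isIn p (pvPat e)))) then "high"
      else "medium" := by
  induction l generalizing hf with
  | nil => simp [pvGo]
  | cons e rest ih =>
    simp only [pvGo, List.any_cons, ih]
    cases hc : (pvCrit.any (fun p => PySem.Str.isIn p (pvPat e))) with
    | true => simp only [Bool.true_or, if_true]
    | false => simp only [Bool.false_or, Bool.or_assoc]; rfl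

-- ===== VERDICT (by name: the statement is the Claim_ definition above) =====
theorem assess_error_severity_py_spec : Claim_equal_assess_error_severity_py := by
  intro errors _ _
  unfold Spec_assess_error_severity_py assess_error_severity_py assess_error_severity_py_alt
  by_cases h : errors = []
  · simp [h]
  · simp [h, pvGo_eq]
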